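-- pv_equiv track=rewrite | github.com/kmatton/ASR-Helper | transcription/process_text_util.py | map_words
-- ===== SOURCE A (Python) =====
-- def map_words(text, word_map):
--     """
--     Map words to their replacements given in word_map dict.
--     """
--     words = text.split(" ")
--     num_words = len(words)
--     i = 0
--     while i < num_words:
--         word = words[i]
--         if word in word_map.keys():
--             word = word_map[word]
--         sub_words = word.split(" ")
--         if len(sub_words) > 1:
--             num_words += process_subwords(i, word.split(" "), words)
--             continue
--         if not word:
--             del words[i]
--             num_words -= 1
--             continue
--         words[i] = word
--         i += 1
--     text = " ".join(words)
--     return text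
--
-- def process_subwords(index, sub_words, words):
--     """
--     Insert subwords into words list starting at index.
--     Return number of new words added (number of subwords - 1) to word list.
--     """
--     words[index] = sub_words[0]
--     j = index + 1
--     for sub_word in sub_words[1:]:
--         words.insert(j, sub_word)
--         j += 1
--     return len(sub_words) - 1
-- ===== SOURCE B (Python) =====
-- def map_words(text, word_map):
--     """
--     Map words to their replacements given in word_map dict.
--     """
--     def rewrite(w):
--         v = word_map.get(w, w)
--         parts = v.split(" ")
--         if len(parts) > 1:
--             return [s for p in parts for s in rewrite(p)]
--         return [] if not v else [v]
--     return " ".join(s for w in text.split(" ") for s in rewrite(w))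
-- ===== Notes on version B (the rewrite author's own statement) =====
-- stated objective: simpler
-- what changed: A rewrites the word list in place with an index, list.insert/del and a while loop that re-scans spliced-in replacement words; B is a pure recursive per-token rewrite (lookup, split, recurse on multi-word replacements, drop empties) flat-mapped over the tokens and joined.
-- outside the precondition, e.g. on map_words('x', {'a': 'a a'}): A returns 'x', B returns 'x'
import Mathlib
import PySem

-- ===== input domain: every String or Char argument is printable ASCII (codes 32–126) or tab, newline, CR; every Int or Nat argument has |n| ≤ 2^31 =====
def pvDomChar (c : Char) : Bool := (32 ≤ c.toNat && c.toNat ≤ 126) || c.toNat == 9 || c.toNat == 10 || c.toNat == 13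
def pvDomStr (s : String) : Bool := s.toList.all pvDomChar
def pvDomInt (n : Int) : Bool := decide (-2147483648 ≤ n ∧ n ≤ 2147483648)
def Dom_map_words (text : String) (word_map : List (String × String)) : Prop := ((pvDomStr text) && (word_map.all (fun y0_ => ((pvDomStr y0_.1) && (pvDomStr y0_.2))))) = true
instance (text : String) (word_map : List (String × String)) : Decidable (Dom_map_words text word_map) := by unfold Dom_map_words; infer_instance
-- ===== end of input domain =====

-- B replaces A's in-place index/insert/delete rewriting of a shared word list by a pure
-- per-token recursive expansion (lookup, split, recurse on multi-word replacements, drop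
-- empties) flat-mapped over the tokens; objective: simpler.

-- shared primitive: Python's s.split(" ") (sep is the non-empty literal " ")
def pySplitSp (s : String) : List String :=
  (PySem.Chars.splitOn s.toList [' ']).map String.ofList

-- ===== PORT A =====
-- fuel bookkeeping for A's while loop (A diverges on cyclic rewrite maps, which Pre_
-- excludes; under Pre_ the fuel below is proved sufficient): cost of fully consuming one
-- token, counted to recursion depth n
def costF (d : PySem.Dict String String) : Nat → String → Nat
  | 0, _ => 1
  | n + 1, w =>
      if 1 < (pySplitSp (d.getD w w)).length then
        1 + ((pySplitSp (d.getD w w)).map (costF d n)).sum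
      else 1

-- A's while loop; state (done, rest) = (words[:i] reversed, words[i:]); the three branches
-- are A's: multi-word replacement spliced in place of words[i] (i unchanged), empty word
-- deleted (i unchanged), otherwise words[i] = word and i += 1.
def mapWordsLoop (d : PySem.Dict String String) : Nat → List String → List String → List String
  | 0, done, rest => done.reverse ++ rest
  | _ + 1, done, [] => done.reverse
  | fuel + 1, done, w :: rs =>
      let word := match d.get? w with
        | some v => v
        | none => w
      let subs := pySplitSp word
      if 1 < subs.length then mapWordsLoop d fuel done (subs ++ rs)
      else if word = "" then mapWordsLoop d fuel done rs
      else mapWordsLoop d fuel (word :: done) rs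

def map_words (text : String) (word_map : List (String × String)) : String :=
  let d := PySem.Dict.ofList word_map
  let words := pySplitSp text
  PySem.Str.join " "
    (mapWordsLoop d (((words.map (costF d (word_map.length + 1))).sum) + 1) [] words)

-- ===== PORT B =====
-- B's recursive per-token rewrite, fueled (fuel word_map.length + 2 is proved sufficient
-- under Pre_; the fuel-0 fallback is the single-word branch)
def rewriteF (d : PySem.Dict String String) : Nat → String → List String
  | 0, w =>
      let v := d.getD w w
      if v = "" then [] else [v]
  | fuel + 1, w =>
      let v := d.getD w w
      let parts := pySplitSp v
      if 1 < parts.length then parts.flatMap (rewriteF d fuel)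
      else if v = "" then [] else [v]

def map_words_alt (text : String) (word_map : List (String × String)) : String :=
  let d := PySem.Dict.ofList word_map
  PySem.Str.join " " ((pySplitSp text).flatMap (rewriteF d (word_map.length + 2)))

-- ===== PRECONDITION & SPEC =====
-- rank of a word in word_map's rewrite graph (nodes: words; an edge from w to each piece
-- of its replacement when that replacement is multi-word): Good d n w says every chain of
-- multi-word replacements from w has length below n — a property of the finite graph of
-- word_map, not of the rewriting computation (no text is consumed here)
def Good (d : PySem.Dict String String) : Nat → String → Bool
  | 0, w => !(decide (1 < (pySplitSp (d.getD w w)).length))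
  | n + 1, w =>
      !(decide (1 < (pySplitSp (d.getD w w)).length)) ||
        (pySplitSp (d.getD w w)).all (Good d n)

-- Pre_ excludes word maps whose graph of multi-word replacements is cyclic (some key's
-- multi-word rewrite chain does not die out within |word_map| rounds): on such maps A's
-- while loop runs forever for any text reaching the cycle, and B's recursion diverges the
-- same way; the condition is on word_map alone, so texts not touching the cycle are also
-- excluded — but on those A and B still return the same string (see cites).
def Pre_map_words (text : String) (word_map : List (String × String)) : Prop :=
  (word_map.all (fun kv =>
    Good (PySem.Dict.ofList word_map) (word_map.length + 1) kv.1)) = true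

instance (text : String) (word_map : List (String × String)) : Decidable (Pre_map_words text word_map) := by
  unfold Pre_map_words; infer_instance

def pvWitness_map_words : String × (List (String × String)) :=
  ("teh cat  wrld", [("teh", "the"), ("wrld", "wide world"), ("wide", "big"), ("", "")])

def Spec_map_words (text : String) (word_map : List (String × String)) (out : String) : Prop := out = map_words_alt text word_map
instance (text : String) (word_map : List (String × String)) (out : String) : Decidable (Spec_map_words text word_map out) := by unfold Spec_map_words; infer_instance

-- ===== CLAIM (what is proved, stated in full; the proofs are below) =====
def Claim_equal_map_words : Prop := ∀ (text : String) (word_map : List (String × String)), Dom_map_words text word_map → Pre_map_words text word_map → Spec_map_words text word_map (map_words text word_map)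

-- ===== LEMMAS AND PROOFS =====

-- structural model of Chars.splitOn for the single-char separator ' '
def mySplit : List Char → List Char → List (List Char)
  | [], cur => [cur.reverse]
  | c :: rest, cur => if c = ' ' then cur.reverse :: mySplit rest [] else mySplit rest (c :: cur)

theorem splitOn_go_eq : ∀ (fuel : Nat) (l cur : List Char) (acc : List (List Char)),
    l.length < fuel →
    PySem.Chars.splitOn.go [' '] fuel l cur acc = acc.reverse ++ mySplit l cur := by
  intro fuel
  induction fuel with
  | zero => intro l cur acc h; omega
  | succ n ih =>
    intro l cur acc h
    cases l with
    | nil => simp [PySem.Chars.splitOn.go, mySplit]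
    | cons c rest =>
      show (if [' '].isPrefixOf (c :: rest) then
              PySem.Chars.splitOn.go [' '] n (List.drop 1 (c :: rest)) [] (cur.reverse :: acc)
            else PySem.Chars.splitOn.go [' '] n rest (c :: cur) acc) = _
      by_cases hc : c = ' '
      · subst hc
        simp only [List.isPrefixOf, List.drop]
        rw [ih rest [] (cur.reverse :: acc) (by simpa using Nat.lt_of_succ_lt_succ h)]
        simp [mySplit]
      · have hp : [' '].isPrefixOf (c :: rest) = false := by
          simp [List.isPrefixOf]; exact fun hce => hc hce.symm
        rw [hp, if_neg (show ¬ (false = true) by simp)]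
        rw [ih rest (c :: cur) acc (by simpa using Nat.lt_of_succ_lt_succ h)]
        simp [mySplit, hc]

theorem splitOn_eq_mySplit (cs : List Char) :
    PySem.Chars.splitOn cs [' '] = mySplit cs [] := by
  show PySem.Chars.splitOn.go [' '] (cs.length + 1) cs [] [] = _
  rw [splitOn_go_eq (cs.length + 1) cs [] [] (by omega)]
  simp

theorem mem_mySplit_no_space {l cur : List Char} (hcur : ' ' ∉ cur) :
    ∀ w ∈ mySplit l cur, ' ' ∉ w := by
  induction l generalizing cur with
  | nil =>
    intro w hw
    simp [mySplit] at hw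
    subst hw; simpa using hcur
  | cons c rest ih =>
    intro w hw
    simp only [mySplit] at hw
    split_ifs at hw with hc
    · rcases List.mem_cons.mp hw with h | h
      · subst h; simpa using hcur
      · exact ih (by simp) w h
    · refine ih ?_ w hw
      intro hm
      rcases List.mem_cons.mp hm with h | h
      · exact hc h.symm
      · exact hcur h

theorem mySplit_no_space {l : List Char} (h : ' ' ∉ l) (cur : List Char) :
    mySplit l cur = [cur.reverse ++ l] := by
  induction l generalizing cur with
  | nil => simp [mySplit]
  | cons c rest ih =>
    have hc : c ≠ ' ' := fun hc => h (by simp [hc])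
    simp only [mySplit, if_neg hc]
    rw [ih (fun hm => h (by simp [hm])) (c :: cur)]
    simp

theorem splitSp_of_no_space {s : String} (h : ' ' ∉ s.toList) : pySplitSp s = [s] := by
  unfold pySplitSp
  rw [splitOn_eq_mySplit, mySplit_no_space h]
  simp [String.ofList_toList]

-- every piece of a split is itself split-fixed
theorem splitSp_self {s t : String} (h : s ∈ pySplitSp t) : pySplitSp s = [s] := by
  unfold pySplitSp at h
  rw [splitOn_eq_mySplit] at h
  rcases List.mem_map.mp h with ⟨w, hw, rfl⟩
  have hnsp : ' ' ∉ w := mem_mySplit_no_space (by simp) w hw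
  exact splitSp_of_no_space (by simpa [String.toList_ofList] using hnsp)

theorem Good_zero (d : PySem.Dict String String) (w : String) :
    Good d 0 w = !(decide (1 < (pySplitSp (d.getD w w)).length)) := rfl
theorem Good_succ (d : PySem.Dict String String) (n : Nat) (w : String) :
    Good d (n + 1) w
      = (!(decide (1 < (pySplitSp (d.getD w w)).length)) ||
          (pySplitSp (d.getD w w)).all (Good d n)) := rfl
theorem costF_succ (d : PySem.Dict String String) (n : Nat) (w : String) :
    costF d (n + 1) w
      = if 1 < (pySplitSp (d.getD w w)).length then
          1 + ((pySplitSp (d.getD w w)).map (costF d n)).sum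
        else 1 := rfl
theorem rewriteF_zero (d : PySem.Dict String String) (w : String) :
    rewriteF d 0 w = if d.getD w w = "" then [] else [d.getD w w] := rfl
theorem rewriteF_succ (d : PySem.Dict String String) (n : Nat) (w : String) :
    rewriteF d (n + 1) w
      = if 1 < (pySplitSp (d.getD w w)).length then
          (pySplitSp (d.getD w w)).flatMap (rewriteF d n)
        else if d.getD w w = "" then [] else [d.getD w w] := rfl

-- rank is upward closed
theorem good_mono (d : PySem.Dict String String) :
    ∀ (n : Nat) (w : String), Good d n w = true → ∀ m, n ≤ m → Good d m w = true := by
  intro n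
  induction n with
  | zero =>
    intro w h m _
    cases m with
    | zero => exact h
    | succ m' =>
      rw [Good_zero] at h
      rw [Good_succ, h]
      rfl
  | succ n ih =>
    intro w h m hm
    cases m with
    | zero => omega
    | succ m' =>
      rw [Good_succ] at h
      rw [Good_succ]
      rcases Bool.or_eq_true_iff.mp h with h1 | h1
      · rw [h1]; rfl
      · refine Bool.or_eq_true_iff.mpr (Or.inr ?_)
        rw [List.all_eq_true] at h1 ⊢
        exact fun p hp => ih p (h1 p hp) m' (by omega)

-- cost is stable once the rank is reached
theorem good_cost (d : PySem.Dict String String) :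
    ∀ (n : Nat) (w : String), Good d n w = true → costF d n w = costF d (n + 1) w := by
  intro n
  induction n with
  | zero =>
    intro w h
    rw [Good_zero] at h
    have hm : ¬ 1 < (pySplitSp (d.getD w w)).length := by simpa using h
    rw [costF_succ, if_neg hm]
    rfl
  | succ n ih =>
    intro w h
    rw [Good_succ] at h
    by_cases hm : 1 < (pySplitSp (d.getD w w)).length
    · have h1 : ∀ p ∈ pySplitSp (d.getD w w), Good d n p = true := by
        rcases Bool.or_eq_true_iff.mp h with h1 | h1
        · exact absurd hm (by simpa using h1)
        · exact List.all_eq_true.mp h1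
      rw [costF_succ, costF_succ, if_pos hm, if_pos hm,
          List.map_congr_left (fun p hp => ih p (h1 p hp))]
    · rw [costF_succ, costF_succ, if_neg hm, if_neg hm]

theorem good_cost_le {d : PySem.Dict String String} {n m : Nat} {w : String}
    (h : Good d n w = true) (hm : n ≤ m) : costF d n w = costF d m w := by
  induction m with
  | zero =>
    obtain rfl : n = 0 := by omega
    rfl
  | succ m' ih =>
    rcases Nat.lt_or_ge n (m' + 1) with hlt | hge
    · rw [ih (by omega)]
      exact good_cost d m' w (good_mono d n w h m' (by omega))
    · obtain rfl : n = m' + 1 := by omega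
      rfl

-- B's rewrite is stable once the rank is reached
theorem good_rew (d : PySem.Dict String String) :
    ∀ (n : Nat) (w : String), Good d n w = true → rewriteF d n w = rewriteF d (n + 1) w := by
  intro n
  induction n with
  | zero =>
    intro w h
    rw [Good_zero] at h
    have hm : ¬ 1 < (pySplitSp (d.getD w w)).length := by simpa using h
    rw [rewriteF_zero, rewriteF_succ, if_neg hm]
  | succ n ih =>
    intro w h
    rw [Good_succ] at h
    by_cases hm : 1 < (pySplitSp (d.getD w w)).length
    · have h1 : ∀ p ∈ pySplitSp (d.getD w w), Good d n p = true := by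
        rcases Bool.or_eq_true_iff.mp h with h1 | h1
        · exact absurd hm (by simpa using h1)
        · exact List.all_eq_true.mp h1
      rw [rewriteF_succ, rewriteF_succ, if_pos hm, if_pos hm]
      exact List.flatMap_congr (fun p hp => ih p (h1 p hp))
    · rw [rewriteF_succ, rewriteF_succ, if_neg hm, if_neg hm]

theorem good_rew_le {d : PySem.Dict String String} {n m : Nat} {w : String}
    (h : Good d n w = true) (hm : n ≤ m) : rewriteF d n w = rewriteF d m w := by
  induction m with
  | zero =>
    obtain rfl : n = 0 := by omega
    rfl
  | succ m' ih =>
    rcases Nat.lt_or_ge n (m' + 1) with hlt | hge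
    · rw [ih (by omega)]
      exact good_rew d m' w (good_mono d n w h m' (by omega))
    · obtain rfl : n = m' + 1 := by omega
      rfl

-- the loop invariant: with cost-based fuel and all pending tokens ranked, A's loop produces
-- done.reverse ++ the flatMap of B's per-token rewrite
theorem loop_eq (d : PySem.Dict String String) (N : Nat) :
    ∀ (fuel : Nat) (done rest : List String),
      (rest.map (costF d N)).sum < fuel →
      (∀ w ∈ rest, Good d N w = true) →
      mapWordsLoop d fuel done rest = done.reverse ++ rest.flatMap (rewriteF d (N + 1)) := by
  intro fuel
  induction fuel with
  | zero => intro done rest h _; omega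
  | succ n ih =>
    intro done rest hfuel hin
    cases rest with
    | nil => simp [mapWordsLoop]
    | cons w rs =>
      have hgw : Good d N w = true := hin w (by simp)
      have hrs : ∀ t ∈ rs, Good d N t = true := fun t ht => hin t (by simp [ht])
      have hword : (match d.get? w with | some v => v | none => w) = d.getD w w := by
        cases hget : d.get? w with
        | none => simp [PySem.Dict.getD_of_get?_eq_none d w hget]
        | some v => simp [PySem.Dict.getD_of_get?_eq_some d w hget]
      simp only [mapWordsLoop, hword]
      by_cases hmulti : 1 < (pySplitSp (d.getD w w)).length
      · rw [if_pos hmulti]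
        cases N with
        | zero =>
          rw [Good_zero] at hgw
          exact absurd hmulti (by simpa using hgw)
        | succ m =>
          have hparts : ∀ p ∈ pySplitSp (d.getD w w), Good d m p = true := by
            rw [Good_succ] at hgw
            rcases Bool.or_eq_true_iff.mp hgw with h1 | h1
            · exact absurd hmulti (by simpa using h1)
            · exact List.all_eq_true.mp h1
          have hpartsN : ∀ p ∈ pySplitSp (d.getD w w), Good d (m + 1) p = true :=
            fun p hp => good_mono d m p (hparts p hp) (m + 1) (by omega)
          have hcw : costF d (m + 1) w
              = 1 + ((pySplitSp (d.getD w w)).map (costF d (m + 1))).sum := by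
            rw [costF_succ, if_pos hmulti,
                List.map_congr_left (fun p hp => good_cost_le (hparts p hp) (by omega :
                  m ≤ m + 1))]
          have hfuel' : ((pySplitSp (d.getD w w) ++ rs).map (costF d (m + 1))).sum < n := by
            simp only [List.map_cons, List.sum_cons, hcw] at hfuel
            simp only [List.map_append, List.sum_append]
            omega
          rw [ih done (pySplitSp (d.getD w w) ++ rs) hfuel'
              (by intro t ht
                  rcases List.mem_append.mp ht with h | h
                  · exact hpartsN t h
                  · exact hrs t h)]
          have hrw : rewriteF d (m + 1 + 1) w
              = (pySplitSp (d.getD w w)).flatMap (rewriteF d (m + 1 + 1)) := by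
            rw [rewriteF_succ, if_pos hmulti]
            exact List.flatMap_congr (fun p hp =>
              (good_rew_le (hparts p hp) (by omega : m ≤ m + 1)).symm.trans
                (good_rew_le (hparts p hp) (by omega : m ≤ m + 1 + 1)))
          rw [List.flatMap_append, List.flatMap_cons, hrw]
      · rw [if_neg hmulti]
        have hc1 : costF d N w = 1 := by
          cases N with
          | zero => rfl
          | succ m => rw [costF_succ, if_neg hmulti]
        have hfuel' : (rs.map (costF d N)).sum < n := by
          simp only [List.map_cons, List.sum_cons, hc1] at hfuel
          omega
        have hrw : rewriteF d (N + 1) w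
            = if d.getD w w = "" then [] else [d.getD w w] := by
          rw [rewriteF_succ, if_neg hmulti]
        by_cases h0 : d.getD w w = ""
        · rw [if_pos h0, ih done rs hfuel' hrs]
          simp [List.flatMap_cons, hrw, h0]
        · rw [if_neg h0, ih (d.getD w w :: done) rs hfuel' hrs]
          simp [List.flatMap_cons, hrw, h0]

-- every token of the text is ranked: keys by Pre_, non-keys trivially (their lookup is
-- themselves, space-free)
theorem keys_ofList_eq (wm : List (String × String)) :
    (PySem.Dict.ofList wm).keys = PySem.Set.ofList (wm.map Prod.fst) := by
  rw [show PySem.Dict.ofList wm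
        = wm.foldl (fun d p => d.insert p.1 p.2) PySem.Dict.empty from rfl]
  rw [PySem.Dict.keys_foldl_insert_key]
  rfl

theorem token_good {word_map : List (String × String)} {text : String}
    (hpre : Pre_map_words text word_map) :
    ∀ w ∈ pySplitSp text,
      Good (PySem.Dict.ofList word_map) (word_map.length + 1) w = true := by
  intro w hw
  cases hget : (PySem.Dict.ofList word_map).get? w with
  | none =>
    have h0 : Good (PySem.Dict.ofList word_map) 0 w = true := by
      simp only [Good]
      rw [PySem.Dict.getD_of_get?_eq_none _ w hget, splitSp_self hw]
      simp
    exact good_mono _ 0 w h0 _ (by omega)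
  | some v =>
    have hk : w ∈ (PySem.Dict.ofList word_map).keys := by
      by_contra hnk
      rw [← PySem.Dict.get?_eq_none_iff_not_mem_keys] at hnk
      rw [hget] at hnk
      simp at hnk
    rw [keys_ofList_eq] at hk
    have hmem : w ∈ word_map.map Prod.fst := (PySem.Set.mem_ofList _ w).mp hk
    obtain ⟨p, hp, hpw⟩ := List.mem_map.mp hmem
    have hg := List.all_eq_true.mp hpre p hp
    simpa [hpw] using hg

-- ===== VERDICT (by name: the statement is the Claim_ definition above) =====
theorem map_words_spec : Claim_equal_map_words := by
  intro text word_map _ hpre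
  unfold Spec_map_words map_words map_words_alt
  show PySem.Str.join " "
      (mapWordsLoop (PySem.Dict.ofList word_map)
        ((((pySplitSp text).map
            (costF (PySem.Dict.ofList word_map) (word_map.length + 1))).sum) + 1)
        [] (pySplitSp text)) = _
  rw [loop_eq (PySem.Dict.ofList word_map) (word_map.length + 1) _ [] (pySplitSp text)
      (by omega) (token_good hpre)]
  rfl
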